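-- pv_equiv track=rewrite | github.com/minhokagomes-debug/Atena | main.py | _optimize_cached_property
-- ===== SOURCE A (Python) =====
-- def _optimize_cached_property(code: str) -> str:
--     """Usa cached_property para propriedades caras"""
--     if 'from functools import cached_property' not in code:
--         lines = code.split('\n')
--         for i, line in enumerate(lines):
--             if line.startswith('import ') or line.startswith('from '):
--                 lines.insert(i, 'from functools import cached_property')
--                 break
--         else:
--             lines.insert(0, 'from functools import cached_property')
--
--         code = '\n'.join(lines)
--
--     # Procurar propriedades com @property
--     lines = code.split('\n')
--
--     for i, line in enumerate(lines):
--         if '@property' in line: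
--             # Verificar se a propriedade tem cálculos pesados
--             for j in range(i+1, min(i+20, len(lines))):
--                 if 'for ' in lines[j] or 'while ' in lines[j]:
--                     lines[i] = '@cached_property'
--                     break
--
--     return '\n'.join(lines)
-- ===== SOURCE B (Python) =====
-- def _optimize_cached_property(code: str) -> str:
--     """Usa cached_property para propriedades caras (single backward pass)."""
--     if 'from functools import cached_property' not in code:
--         lines = code.split('\n')
--         pos = next((i for i, line in enumerate(lines)
--                     if line.startswith('import ') or line.startswith('from ')), 0)
--         lines.insert(pos, 'from functools import cached_property')
--         code = '\n'.join(lines)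
--
--     # One backward pass: nxt = index of the nearest 'for '/'while ' line below.
--     lines = code.split('\n')
--     n = len(lines)
--     nxt = n + 20  # sentinel: no trigger below yet
--     out = []
--     for i in range(n - 1, -1, -1):
--         line = lines[i]
--         if '@property' in line and nxt <= i + 19:
--             out.append('@cached_property')
--         else:
--             out.append(line)
--         if 'for ' in line or 'while ' in line:
--             nxt = i
--     out.reverse()
--     return '\n'.join(out)
-- ===== Notes on version B (the rewrite author's own statement) =====
-- stated objective: alternative
-- what changed: Phase 2's nested forward 20-line sub-scan per property-decorator line is replaced by a single backward pass that carries the index of the nearest following loop-keyword line, deciding each line in O(1); phase 1's for-else search becomes a next()-based first-index lookup.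
import Mathlib
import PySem

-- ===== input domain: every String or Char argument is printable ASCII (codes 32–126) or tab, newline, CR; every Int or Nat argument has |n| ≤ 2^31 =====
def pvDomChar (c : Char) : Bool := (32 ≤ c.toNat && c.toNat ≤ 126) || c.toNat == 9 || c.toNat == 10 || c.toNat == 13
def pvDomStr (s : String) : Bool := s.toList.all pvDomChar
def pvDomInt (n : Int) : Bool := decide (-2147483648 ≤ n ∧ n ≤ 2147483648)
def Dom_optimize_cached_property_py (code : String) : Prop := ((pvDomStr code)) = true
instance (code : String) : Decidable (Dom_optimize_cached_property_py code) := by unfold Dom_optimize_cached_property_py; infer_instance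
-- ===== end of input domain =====

-- B replaces A's nested forward window scans by a single backward pass carrying the index
-- of the nearest 'for '/'while ' line below (objective: a one-pass alternative algorithm).

-- ===== PORT A =====
-- A's for-…-break/else search for the first import line (index of the first match)
def pvAFindImport : List String → Option Nat
  | [] => none
  | l :: rest =>
    if PySem.Str.startswith l "import " || PySem.Str.startswith l "from " then some 0
    else (pvAFindImport rest).map (· + 1)

-- one iteration of A's outer loop over i (reads and writes the live lines list)
def pvStepA (ls : List String) (i : Nat) : List String :=
  if PySem.Str.isIn "@property" (ls.getD i "") then
    if (List.range' (i+1) (min (i+20) ls.length - (i+1))).any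
         (fun j => PySem.Str.isIn "for " (ls.getD j "") || PySem.Str.isIn "while " (ls.getD j "")) then
      ls.set i "@cached_property"
    else ls
  else ls

def optimize_cached_property_py (code : String) : String :=
  let code1 :=
    if !(PySem.Str.isIn "from functools import cached_property" code) then
      let lines := (PySem.Str.split? code "\n").getD []
      let lines2 :=
        match pvAFindImport lines with
        | some i => PySem.List.insert lines (i : Int) "from functools import cached_property"
        | none => PySem.List.insert lines (0 : Int) "from functools import cached_property"
      PySem.Str.join "\n" lines2
    else code
  let lines := (PySem.Str.split? code1 "\n").getD []
  PySem.Str.join "\n" ((List.range lines.length).foldl pvStepA lines)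

-- ===== PORT B =====
-- one iteration of B's backward loop: state = (index of nearest trigger below, output built so far)
def pvStepB (p : Int × String) (st : Int × List String) : Int × List String :=
  let out' := (if PySem.Str.isIn "@property" p.2 && decide (st.1 ≤ p.1 + 19)
               then "@cached_property" else p.2) :: st.2
  ((if PySem.Str.isIn "for " p.2 || PySem.Str.isIn "while " p.2 then p.1 else st.1), out')

def optimize_cached_property_py_alt (code : String) : String :=
  let code1 :=
    if !(PySem.Str.isIn "from functools import cached_property" code) then
      let lines := (PySem.Str.split? code "\n").getD []
      let pos := (lines.findIdx? (fun line =>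
        PySem.Str.startswith line "import " || PySem.Str.startswith line "from ")).getD 0
      PySem.Str.join "\n" (PySem.List.insert lines (pos : Int) "from functools import cached_property")
    else code
  let lines := (PySem.Str.split? code1 "\n").getD []
  let n := lines.length
  let res := (PySem.List.enumerate lines).foldr pvStepB ((n : Int) + 20, [])
  PySem.Str.join "\n" res.2

-- ===== PRECONDITION & SPEC =====
def Spec_optimize_cached_property_py (code : String) (out : String) : Prop := out = optimize_cached_property_py_alt code
instance (code : String) (out : String) : Decidable (Spec_optimize_cached_property_py code out) := by unfold Spec_optimize_cached_property_py; infer_instance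

-- ===== CLAIM (what is proved, stated in full; the proofs are below) =====
def Claim_equal_optimize_cached_property_py : Prop := ∀ (code : String), Dom_optimize_cached_property_py code → Spec_optimize_cached_property_py code (optimize_cached_property_py code)

-- ===== LEMMAS AND PROOFS =====

def pvProp (l : String) : Bool := PySem.Str.isIn "@property" l
def pvTrig (l : String) : Bool := PySem.Str.isIn "for " l || PySem.Str.isIn "while " l

def pvW (ls : List String) (i : Nat) : Bool :=
  (List.range' (i+1) (min (i+20) ls.length - (i+1))).any (fun j => pvTrig (ls.getD j ""))

def pvNextT : List String → Int → Int → Int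
  | [], _, d => d
  | l :: r, s, d => if pvTrig l then s else pvNextT r (s+1) d

def pvOutB : List String → Int → Int → List String
  | [], _, _ => []
  | l :: r, s, d =>
    (if pvProp l && decide (pvNextT r (s+1) d ≤ s + 19) then "@cached_property" else l) :: pvOutB r (s+1) d

lemma pvAFindImport_eq (ls : List String) :
    pvAFindImport ls = ls.findIdx? (fun l =>
      PySem.Str.startswith l "import " || PySem.Str.startswith l "from ") := by
  induction ls with
  | nil => rfl
  | cons l rest ih => simp [pvAFindImport, List.findIdx?_cons, ih]

lemma pvB_fold (ls : List String) : ∀ (s d : Int) (acc : List String),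
    (PySem.List.enumerate ls s).foldr pvStepB (d, acc) =
      (pvNextT ls s d, pvOutB ls s d ++ acc) := by
  induction ls with
  | nil => intro s d acc; rfl
  | cons l r ih =>
    intro s d acc
    rw [PySem.List.enumerate_cons, List.foldr_cons, ih (s+1) d acc]
    rfl

lemma pvOutB_length (ls : List String) : ∀ s d, (pvOutB ls s d).length = ls.length := by
  induction ls with
  | nil => intro s d; rfl
  | cons l r ih => intro s d; simp [pvOutB, ih]

lemma pvOutB_getD (ls : List String) : ∀ (s d : Int) (k : Nat), k < ls.length →
    (pvOutB ls s d).getD k "" =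
      if pvProp (ls.getD k "") && decide (pvNextT (ls.drop (k+1)) (s + k + 1) d ≤ s + k + 19)
      then "@cached_property" else ls.getD k "" := by
  induction ls with
  | nil => intro s d k hk; simp at hk
  | cons l r ih =>
    intro s d k hk
    cases k with
    | zero => simp [pvOutB]
    | succ k =>
      have hk' : k < r.length := by simpa using hk
      have hrec := ih (s+1) d k hk'
      simp only [pvOutB, List.getD_cons_succ, List.drop_succ_cons]
      rw [hrec]
      have h1 : s + 1 + (k : Int) + 1 = s + ((k+1 : Nat) : Int) + 1 := by push_cast; ring
      have h2 : s + 1 + (k : Int) + 19 = s + ((k+1 : Nat) : Int) + 19 := by push_cast; ring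
      rw [h1, h2]
      rfl

lemma pvNextT_le_iff (ls : List String) : ∀ (s d B : Int), B < d →
    (pvNextT ls s d ≤ B ↔ ∃ k : Nat, k < ls.length ∧ s + k ≤ B ∧ pvTrig (ls.getD k "") = true) := by
  induction ls with
  | nil =>
    intro s d B hB
    simp only [pvNextT]
    constructor
    · intro h; exact absurd h (by omega)
    · rintro ⟨k, hk, -, -⟩; simp at hk
  | cons l r ih =>
    intro s d B hB
    by_cases ht : pvTrig l = true
    · have hN : pvNextT (l :: r) s d = s := by simp [pvNextT, ht]
      rw [hN]
      constructor
      · intro h; exact ⟨0, by simp, by simpa using h, by simpa using ht⟩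
      · rintro ⟨k, -, hle, -⟩
        have hk0 : (0:Int) ≤ (k : Int) := Int.natCast_nonneg k
        omega
    · have hN : pvNextT (l :: r) s d = pvNextT r (s+1) d := by simp [pvNextT, ht]
      rw [hN, ih (s+1) d B hB]
      constructor
      · rintro ⟨k, hk, hle, htr⟩
        exact ⟨k+1, by simpa using hk, by push_cast at hle ⊢; omega, by simpa using htr⟩
      · rintro ⟨k, hk, hle, htr⟩
        match k, htr, hk, hle with
        | 0, htr, hk, hle => exact absurd (by simpa using htr) ht
        | (k+1), htr, hk, hle =>
          exact ⟨k, by simpa using hk, by push_cast at hle ⊢; omega, by simpa using htr⟩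

lemma pvW_iff (ls : List String) (i : Nat) :
    pvW ls i = true ↔ ∃ j : Nat, i+1 ≤ j ∧ j < min (i+20) ls.length ∧ pvTrig (ls.getD j "") = true := by
  unfold pvW
  rw [List.any_eq_true]
  constructor
  · rintro ⟨j, hj, htr⟩
    rw [List.mem_range'_1] at hj
    exact ⟨j, hj.1, by omega, htr⟩
  · rintro ⟨j, h1, h2, htr⟩
    exact ⟨j, by rw [List.mem_range'_1]; omega, htr⟩

-- the two per-line conditions agree
lemma pvCond_eq (ls : List String) (i : Nat) (hi : i < ls.length) :
    decide (pvNextT (ls.drop (i+1)) ((0:Int) + i + 1) ((ls.length : Int) + 20) ≤ (0:Int) + i + 19)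
      = pvW ls i := by
  rw [Bool.eq_iff_iff, decide_eq_true_iff, pvW_iff,
    pvNextT_le_iff _ _ _ _ (by omega)]
  constructor
  · rintro ⟨k, hk, hle, htr⟩
    refine ⟨i+1+k, by omega, ?_, ?_⟩
    · rw [Nat.lt_min]
      simp only [List.length_drop] at hk; omega
    · have hd : (ls.drop (i+1)).getD k "" = ls.getD (i+1+k) "" := by
        simp [List.getD, List.getElem?_drop]
      rwa [hd] at htr
  · rintro ⟨j, h1, h2, htr⟩
    rcases Nat.lt_min.mp h2 with ⟨h2a, h2b⟩
    refine ⟨j - (i+1), by simp only [List.length_drop]; omega, by clear h2; omega, ?_⟩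
    have hd : (ls.drop (i+1)).getD (j - (i+1)) "" = ls.getD j "" := by
      simp only [List.getD, List.getElem?_drop]
      rw [Nat.add_sub_cancel' h1]
    rwa [hd]

lemma pvStepA_eq (ls : List String) (i : Nat) :
    pvStepA ls i = if pvProp (ls.getD i "") = true then
      (if pvW ls i = true then ls.set i "@cached_property" else ls) else ls := rfl

lemma pvA_inv (ls : List String) : ∀ k, k ≤ ls.length →
    ((List.range k).foldl pvStepA ls).length = ls.length ∧
    ∀ j : Nat, ((List.range k).foldl pvStepA ls).getD j "" =
      if j < k ∧ (pvProp (ls.getD j "") && pvW ls j) = true then "@cached_property"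
      else ls.getD j "" := by
  intro k
  induction k with
  | zero => intro _; simp
  | succ k ih =>
    intro hk
    obtain ⟨hlen, hget⟩ := ih (by omega)
    set r := (List.range k).foldl pvStepA ls with hr
    have hstep : (List.range (k+1)).foldl pvStepA ls = pvStepA r k := by
      rw [List.range_succ, List.foldl_append, List.foldl_cons, List.foldl_nil]
    have hrk : r.getD k "" = ls.getD k "" := by
      rw [hget k, if_neg]; rintro ⟨h, -⟩; omega
    have hW : pvW r k = pvW ls k := by
      rw [Bool.eq_iff_iff, pvW_iff, pvW_iff, hlen]
      constructor <;> rintro ⟨j, h1, h2, htr⟩ <;> refine ⟨j, h1, h2, ?_⟩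
      · rw [hget j, if_neg (by rintro ⟨h, -⟩; omega)] at htr; exact htr
      · rw [hget j, if_neg (by rintro ⟨h, -⟩; omega)]; exact htr
    by_cases hc : (pvProp (ls.getD k "") && pvW ls k) = true
    · obtain ⟨hp, hw⟩ : pvProp (ls.getD k "") = true ∧ pvW ls k = true := by
        simpa [Bool.and_eq_true] using hc
      have hstep2 : pvStepA r k = r.set k "@cached_property" := by
        rw [pvStepA_eq, hrk, hW, if_pos hp, if_pos hw]
      rw [hstep, hstep2]
      refine ⟨by rw [List.length_set, hlen], fun j => ?_⟩
      by_cases hj : j = k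
      · subst hj
        have hjlen : j < r.length := by omega
        rw [List.getD, List.getElem?_set_self hjlen]
        simp only [Option.getD_some]
        rw [if_pos ⟨by omega, hc⟩]
      · rw [List.getD, List.getElem?_set_ne (fun h => hj h.symm), ← List.getD, hget j]
        exact if_congr (by constructor <;> rintro ⟨h1, h2⟩ <;> exact ⟨by omega, h2⟩) rfl rfl
    · have hstep2 : pvStepA r k = r := by
        rw [pvStepA_eq, hrk, hW]
        by_cases hp : pvProp (ls.getD k "") = true
        · rw [if_pos hp, if_neg]; intro hw; exact hc (by rw [hp, hw]; rfl)
        · rw [if_neg hp]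
      rw [hstep, hstep2]
      refine ⟨hlen, fun j => ?_⟩
      rw [hget j]
      by_cases hj : j = k
      · subst hj
        rw [if_neg (by rintro ⟨h, -⟩; omega), if_neg (by rintro ⟨-, h⟩; exact hc h)]
      · exact if_congr (by constructor <;> rintro ⟨h1, h2⟩ <;> exact ⟨by omega, h2⟩) rfl rfl

lemma pvPhase2_eq (ls : List String) :
    (List.range ls.length).foldl pvStepA ls =
      ((PySem.List.enumerate ls).foldr pvStepB ((ls.length : Int) + 20, [])).2 := by
  have hB := pvB_fold ls 0 ((ls.length : Int) + 20) []
  rw [show PySem.List.enumerate ls = PySem.List.enumerate ls 0 from rfl, hB]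
  simp only [List.append_nil]
  obtain ⟨hlen, hget⟩ := pvA_inv ls ls.length le_rfl
  apply List.ext_getElem (by rw [hlen, pvOutB_length])
  intro j h1 h2
  have hj : j < ls.length := by rw [hlen] at h1; exact h1
  rw [← List.getD_eq_getElem _ "" h1, ← List.getD_eq_getElem _ "" h2,
    hget j, pvOutB_getD ls 0 _ j hj, pvCond_eq ls j hj]
  by_cases hc : (pvProp (ls.getD j "") && pvW ls j) = true
  · rw [if_pos ⟨hj, hc⟩, if_pos hc]
  · rw [if_neg (by rintro ⟨-, h⟩; exact hc h), if_neg hc]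

-- ===== VERDICT (by name: the statement is the Claim_ definition above) =====
theorem optimize_cached_property_py_spec : Claim_equal_optimize_cached_property_py := by
  intro code _
  unfold Spec_optimize_cached_property_py optimize_cached_property_py optimize_cached_property_py_alt
  simp only []
  rw [pvAFindImport_eq]
  cases hf : ((PySem.Str.split? code "\n").getD []).findIdx? (fun l =>
      PySem.Str.startswith l "import " || PySem.Str.startswith l "from ") with
  | none => simp only [Option.getD_none, Nat.cast_zero, pvPhase2_eq]
  | some i => simp only [Option.getD_some, pvPhase2_eq]
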